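-- pv_equiv track=rewrite | github.com/zrygan/dsa | ROSALIND/Complementing a Strand of DNA/solution.py | complement_dna
-- ===== SOURCE A (Python) =====
-- def complement_dna(dna: str) -> str:
--     # Complement of DNA is given by:
--     #   A -> T (vice versa)
--     #   C -> G
--     if any(char not in ['A', 'T', 'C', 'G'] for char in dna):
--         return None
--
--     complement = ""
--
--     # complement DNA
--     for char in dna:
--         match char:
--             case "A":
--                 complement += "T"
--             case "T":
--                 complement += "A"
--             case "C":
--                 complement += "G"
--             case "G":
--                 complement += "C"
--
--     # reverse complement
--     length = len(complement)
--     complement = list(complement)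
--     for i in range(0, length // 2):
--         j = length - i - 1
--         complement[i], complement[j] = complement[j], complement[i]
--
--     return "".join(complement)
-- ===== SOURCE B (Python) =====
-- _TABLE = {'A': 'T', 'T': 'A', 'C': 'G', 'G': 'C'}
--
-- def complement_dna(dna: str) -> str:
--     # Single fused backward pass: walk indices from the end, look up each
--     # complement, and bail out the moment an invalid character is seen.
--     out = []
--     i = len(dna) - 1
--     while i >= 0:
--         t = _TABLE.get(dna[i])
--         if t is None:
--             return None
--         out.append(t)
--         i -= 1
--     return "".join(out)
-- ===== Notes on version B (the rewrite author's own statement) =====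
-- stated objective: simpler
-- what changed: Replaces A's three sequential phases (whole-string validation, a string-append complement loop, then an in-place index-swap reversal loop) with one fused backward index walk that validates, complements and emits in reversed order in a single pass with early exit on the first invalid character.
import Mathlib
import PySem

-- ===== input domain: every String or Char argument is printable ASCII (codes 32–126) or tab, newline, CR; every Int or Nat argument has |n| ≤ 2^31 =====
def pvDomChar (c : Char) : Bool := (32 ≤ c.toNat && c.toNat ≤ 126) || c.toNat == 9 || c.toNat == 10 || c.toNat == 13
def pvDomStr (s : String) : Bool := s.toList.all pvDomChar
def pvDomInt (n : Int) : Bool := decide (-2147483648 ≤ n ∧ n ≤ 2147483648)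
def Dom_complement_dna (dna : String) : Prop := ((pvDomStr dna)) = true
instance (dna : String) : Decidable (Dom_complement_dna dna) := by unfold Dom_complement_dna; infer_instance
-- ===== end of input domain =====

-- B replaces A's three phases (validation, complement loop, index-swap reversal) by one fused
-- backward index walk with early exit; return value equal everywhere.

-- ===== PORT A =====
def complement_dna (dna : String) : Option String :=
  if dna.toList.any (fun c => decide (c ∉ (['A', 'T', 'C', 'G'] : List Char))) then none
  else
    -- complement DNA (string built by repeated append; unmatched case appends nothing)
    let complement : List Char := dna.toList.foldl (fun acc c =>
      if c = 'A' then acc ++ ['T']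
      else if c = 'T' then acc ++ ['A']
      else if c = 'C' then acc ++ ['G']
      else if c = 'G' then acc ++ ['C']
      else acc) []
    -- reverse complement by swapping ends, i with length-i-1, for i in range(0, length//2)
    let length := complement.length
    let complement := (PySem.List.pyRange 0 (PySem.Int.floordiv (length : Int) 2) 1).foldl
      (fun acc i =>
        let j : Int := (length : Int) - i - 1
        let t1 := PySem.List.pyGetD acc j ' '
        let t2 := PySem.List.pyGetD acc i ' '
        PySem.List.pySetD (PySem.List.pySetD acc i t1) j t2) complement
    some (String.ofList complement)

-- ===== PORT B =====
def pvTable : PySem.Dict Char Char :=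
  PySem.Dict.mk [('A', 'T'), ('T', 'A'), ('C', 'G'), ('G', 'C')]

-- B's while loop: counter n stands for Python's i+1 (i = n-1 runs down to 0); stops at i < 0,
-- returns none on the first character _TABLE.get misses, else appends the looked-up complement.
def pvAltLoop (cs : List Char) : Nat → List Char → Option (List Char)
  | 0, out => some out
  | i + 1, out =>
    match PySem.Dict.get? pvTable (PySem.List.pyGetD cs (i : Int) ' ') with
    | none => none
    | some t => pvAltLoop cs i (out ++ [t])

def complement_dna_alt (dna : String) : Option String :=
  (pvAltLoop dna.toList dna.toList.length []).map String.ofList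

-- ===== PRECONDITION & SPEC =====
def Spec_complement_dna (dna : String) (out : Option String) : Prop := out = complement_dna_alt dna
instance (dna : String) (out : Option String) : Decidable (Spec_complement_dna dna out) := by unfold Spec_complement_dna; infer_instance

-- ===== CLAIM (what is proved, stated in full; the proofs are below) =====
def Claim_equal_complement_dna : Prop := ∀ (dna : String), Dom_complement_dna dna → Spec_complement_dna dna (complement_dna dna)

-- ===== LEMMAS AND PROOFS =====

-- per-character agreement of the two validity tests
lemma table_isSome (c : Char) :
    (PySem.Dict.get? pvTable c).isSome = decide (c ∈ (['A', 'T', 'C', 'G'] : List Char)) := by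
  by_cases hA : c = 'A'
  · subst hA; rfl
  by_cases hT : c = 'T'
  · subst hT; rfl
  by_cases hC : c = 'C'
  · subst hC; rfl
  by_cases hG : c = 'G'
  · subst hG; rfl
  have e : ∀ d : Char, ¬ c = d → (d == c) = false :=
    fun d h => beq_eq_false_iff_ne.mpr (fun h2 => h h2.symm)
  simp [pvTable, PySem.Dict.get?, e _ hA, e _ hT, e _ hC, e _ hG, hA, hT, hC, hG]

-- on valid characters A's append branch is appending B's table value
lemma branch_eq (acc : List Char) (c : Char) (h : c ∈ (['A', 'T', 'C', 'G'] : List Char)) :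
    (if c = 'A' then acc ++ ['T']
      else if c = 'T' then acc ++ ['A']
      else if c = 'C' then acc ++ ['G']
      else if c = 'G' then acc ++ ['C']
      else acc) = acc ++ [PySem.Dict.getD pvTable c ' '] := by
  fin_cases h <;> simp [pvTable, PySem.Dict.getD, PySem.Dict.get?]

-- the index-swap loop preserves the length of its accumulator
lemma swap_loop_length (cs : List Char) (is : List Int) (acc : List Char) :
    (is.foldl
      (fun acc i =>
        let j : Int := (cs.length : Int) - i - 1
        let t1 := PySem.List.pyGetD acc j ' '
        let t2 := PySem.List.pyGetD acc i ' '
        PySem.List.pySetD (PySem.List.pySetD acc i t1) j t2) acc).length = acc.length := by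
  induction is generalizing acc with
  | nil => rfl
  | cons i is ih => simp [List.foldl_cons, ih, PySem.List.length_pySetD]

-- the index-swap loop, elementwise: after k swaps, positions < k and ≥ n-k hold the mirrored entries
lemma swap_loop_getElem? (cs : List Char) (k : Nat) (hk : k ≤ cs.length / 2) (m : Nat) :
    ((PySem.List.pyRange 0 (k : Int) 1).foldl
      (fun acc i =>
        let j : Int := (cs.length : Int) - i - 1
        let t1 := PySem.List.pyGetD acc j ' '
        let t2 := PySem.List.pyGetD acc i ' '
        PySem.List.pySetD (PySem.List.pySetD acc i t1) j t2) cs)[m]? =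
      if m < k ∨ (cs.length - k ≤ m ∧ m < cs.length) then cs[cs.length - 1 - m]? else cs[m]? := by
  induction k generalizing m with
  | zero =>
    rw [PySem.List.pyRange_one_eq_nil (by omega), List.foldl_nil, if_neg (by omega)]
  | succ k ih =>
    have hn : 2 * (k + 1) ≤ cs.length := by omega
    have hcast : ((k + 1 : Nat) : Int) = (k : Nat) + 1 := by push_cast; ring
    rw [hcast, PySem.List.pyRange_one_succ_right (by positivity), List.foldl_append,
      List.foldl_cons, List.foldl_nil]
    set P := ((PySem.List.pyRange 0 (k : Int) 1).foldl
      (fun acc i =>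
        let j : Int := (cs.length : Int) - i - 1
        let t1 := PySem.List.pyGetD acc j ' '
        let t2 := PySem.List.pyGetD acc i ' '
        PySem.List.pySetD (PySem.List.pySetD acc i t1) j t2) cs) with hP
    have ihm := fun m => ih (by omega) m
    have hlen : P.length = cs.length := by rw [hP]; exact swap_loop_length cs _ cs
    have hjnat : ((cs.length : Int) - (k : Nat) - 1) = ((cs.length - k - 1 : Nat) : Int) := by
      omega
    have hj1 : cs.length - k - 1 < cs.length := by omega
    have hkP : (k : Nat) < cs.length := by omega
    show (PySem.List.pySetD (PySem.List.pySetD P (k : Nat)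
        (PySem.List.pyGetD P ((cs.length : Int) - (k : Nat) - 1) ' '))
        ((cs.length : Int) - (k : Nat) - 1) (PySem.List.pyGetD P ((k : Nat) : Int) ' '))[m]? = _
    -- values read before the two writes
    have ht1 : PySem.List.pyGetD P ((cs.length : Int) - (k : Nat) - 1) ' ' = cs[cs.length - k - 1] := by
      have h1 := ihm (cs.length - k - 1)
      rw [if_neg (by omega), List.getElem?_eq_getElem hj1] at h1
      rw [hjnat, PySem.List.pyGetD_natCast, List.getD_eq_getElem?_getD, h1, Option.getD_some]
    have ht2 : PySem.List.pyGetD P ((k : Nat) : Int) ' ' = cs[k] := by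
      have h1 := ihm k
      rw [if_neg (by omega), List.getElem?_eq_getElem hkP] at h1
      rw [PySem.List.pyGetD_natCast, List.getD_eq_getElem?_getD, h1, Option.getD_some]
    rw [ht1, ht2, hjnat, PySem.List.pySetD_natCast, PySem.List.pySetD_natCast]
    rw [List.getElem?_set, List.getElem?_set, List.length_set, hlen]
    by_cases hm1 : cs.length - k - 1 = m
    · rw [if_pos hm1, if_pos (by omega), if_pos (by omega),
        List.getElem?_eq_getElem (by omega : cs.length - 1 - m < cs.length)]
      simp only [show cs.length - 1 - m = k by omega]
    · rw [if_neg hm1]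
      by_cases hm2 : k = m
      · rw [if_pos hm2, if_pos (by omega), if_pos (by omega),
          List.getElem?_eq_getElem (by omega : cs.length - 1 - m < cs.length)]
        simp only [show cs.length - 1 - m = cs.length - k - 1 by omega]
      · rw [if_neg hm2, ihm m]
        by_cases hin : m < k ∨ (cs.length - k ≤ m ∧ m < cs.length)
        · rw [if_pos hin, if_pos (by omega)]
        · rw [if_neg hin, if_neg (by omega)]

-- the full index-swap loop reverses the list
lemma swap_loop_reverse (cs : List Char) :
    (PySem.List.pyRange 0 (PySem.Int.floordiv (cs.length : Int) 2) 1).foldl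
      (fun acc i =>
        let j : Int := (cs.length : Int) - i - 1
        let t1 := PySem.List.pyGetD acc j ' '
        let t2 := PySem.List.pyGetD acc i ' '
        PySem.List.pySetD (PySem.List.pySetD acc i t1) j t2) cs = cs.reverse := by
  have hfd : PySem.Int.floordiv ((cs.length : Nat) : Int) 2 = ((cs.length / 2 : Nat) : Int) := by
    exact_mod_cast PySem.Int.floordiv_natCast cs.length 2
  rw [hfd]
  apply List.ext_getElem?
  intro m
  rw [swap_loop_getElem? cs (cs.length / 2) le_rfl m]
  by_cases hmn : m < cs.length
  · rw [List.getElem?_reverse (by simpa using hmn)]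
    by_cases hc : m < cs.length / 2 ∨ (cs.length - cs.length / 2 ≤ m ∧ m < cs.length)
    · rw [if_pos hc]
    · rw [if_neg hc]
      congr 1
      omega
  · rw [if_neg (by omega), List.getElem?_eq_none_iff.mpr (by omega),
      List.getElem?_eq_none_iff.mpr (by simp only [List.length_reverse]; omega)]

-- B's backward loop characterised: it processes cs.take n from the back
lemma altLoop_spec (cs : List Char) (n : Nat) (hn : n ≤ cs.length) (out : List Char) :
    pvAltLoop cs n out =
      if (cs.take n).all (fun c => (PySem.Dict.get? pvTable c).isSome) then
        some (out ++ ((cs.take n).map (fun c => PySem.Dict.getD pvTable c ' ')).reverse)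
      else none := by
  induction n generalizing out with
  | zero => simp [pvAltLoop]
  | succ n ih =>
    have hni : n < cs.length := by omega
    have hget : PySem.List.pyGetD cs (n : Int) ' ' = cs[n] := by
      rw [PySem.List.pyGetD_natCast, List.getD_eq_getElem?_getD,
        List.getElem?_eq_getElem hni, Option.getD_some]
    have htake : cs.take (n + 1) = cs.take n ++ [cs[n]] := by
      rw [List.take_succ, List.getElem?_eq_getElem hni]; rfl
    rw [show pvAltLoop cs (n + 1) out =
        (match PySem.Dict.get? pvTable (PySem.List.pyGetD cs (n : Int) ' ') with
          | none => none
          | some t => pvAltLoop cs n (out ++ [t])) from rfl, hget, htake]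
    cases hc : PySem.Dict.get? pvTable cs[n] with
    | none =>
      have happ : ((List.take n cs ++ [cs[n]]).all
          fun c => (PySem.Dict.get? pvTable c).isSome) = false := by
        rw [List.all_append]; simp [hc]
      rw [if_neg (by rw [happ]; exact Bool.false_ne_true)]
    | some t =>
      show pvAltLoop cs n (out ++ [t]) = _
      rw [ih (by omega)]
      have hgd : PySem.Dict.getD pvTable cs[n] ' ' = t := by
        simp [PySem.Dict.getD, hc]
      have happ : ((List.take n cs ++ [cs[n]]).all
            fun c => (PySem.Dict.get? pvTable c).isSome) =
          ((List.take n cs).all fun c => (PySem.Dict.get? pvTable c).isSome) := by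
        rw [List.all_append]; simp [hc]
      by_cases hall : ((cs.take n).all fun c => (PySem.Dict.get? pvTable c).isSome) = true
      · rw [if_pos hall, if_pos (by rw [happ]; exact hall)]
        have h2 : List.take (n + 1) (List.map (fun c => PySem.Dict.getD pvTable c ' ') cs) =
            List.take n (List.map (fun c => PySem.Dict.getD pvTable c ' ') cs) ++
              [PySem.Dict.getD pvTable cs[n] ' '] := by
          rw [List.take_succ, List.getElem?_map, List.getElem?_eq_getElem hni]; rfl
        simp [h2, hgd]
      · rw [if_neg hall, if_neg (by rw [happ]; exact hall)]

-- the two validity guards agree (B's all = the negation of A's any)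
lemma guard_eq (l : List Char) :
    (l.all fun c => (PySem.Dict.get? pvTable c).isSome) =
      !(l.any fun c => decide (c ∉ (['A', 'T', 'C', 'G'] : List Char))) := by
  rw [List.all_eq_not_any_not]
  congr 1
  apply List.any_congr rfl
  intro c
  rw [table_isSome]
  simp

-- ===== VERDICT (by name: the statement is the Claim_ definition above) =====
theorem complement_dna_spec : Claim_equal_complement_dna := by
  intro dna _
  unfold Spec_complement_dna complement_dna complement_dna_alt
  rw [altLoop_spec dna.toList dna.toList.length le_rfl [], List.take_length]
  by_cases hg : (dna.toList.any fun c => decide (c ∉ (['A', 'T', 'C', 'G'] : List Char))) = true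
  · rw [if_pos hg, if_neg (by rw [guard_eq, hg]; simp), Option.map_none]
  · simp only [Bool.not_eq_true] at hg
    have hv : ∀ c ∈ dna.toList, c ∈ (['A', 'T', 'C', 'G'] : List Char) := by
      intro c hc
      by_contra hcv
      have : (dna.toList.any fun c => decide (c ∉ (['A', 'T', 'C', 'G'] : List Char))) = true :=
        List.any_eq_true.mpr ⟨c, hc, by simpa using hcv⟩
      rw [hg] at this
      exact Bool.false_ne_true this
    rw [if_neg (by rw [hg]; exact Bool.false_ne_true), if_pos (by rw [guard_eq, hg]; rfl)]
    have hmap : dna.toList.foldl (fun acc c =>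
        if c = 'A' then acc ++ ['T']
        else if c = 'T' then acc ++ ['A']
        else if c = 'C' then acc ++ ['G']
        else if c = 'G' then acc ++ ['C']
        else acc) [] = dna.toList.map (fun c => PySem.Dict.getD pvTable c ' ') := by
      rw [PySem.List.foldl_congr_mem' dna.toList _
        (fun acc c => acc ++ [PySem.Dict.getD pvTable c ' ']) []
        (fun c hc acc => branch_eq acc c (hv c hc)),
        PySem.List.foldl_append_singleton_eq_map]
      simp
    simp only [hmap, swap_loop_reverse, Option.map_some, List.nil_append]
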